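-- pv_equiv track=rewrite | github.com/BruinGrowly/Emergent-Code | autopoiesis/living_agent.py | evaluate_change_impact
-- ===== SOURCE A (Python) =====
-- from typing import Dict, List, Optional, Callable
--
-- def evaluate_change_impact(changes: Dict[str, List[str]]) -> str:
--     """Evaluate the impact of detected changes."""
--     total_changes = sum(len(v) for v in changes.values())
--
--     if total_changes == 0:
--         return "stable"
--     elif total_changes <= 3:
--         return "minor"
--     elif total_changes <= 10:
--         return "moderate"
--     else:
--         return "significant"
-- ===== SOURCE B (Python) =====
-- def _bisect_left(a, x):
--     lo, hi = 0, len(a)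
--     while lo < hi:
--         mid = (lo + hi) // 2
--         if a[mid] < x:
--             lo = mid + 1
--         else:
--             hi = mid
--     return lo
--
-- def evaluate_change_impact(changes):
--     """Evaluate the impact of detected changes."""
--     total = sum(map(len, changes.values()))
--     labels = ["stable", "minor", "moderate", "significant"]
--     return labels[_bisect_left([0, 3, 10], total)]
-- ===== Notes on version B (the rewrite author's own statement) =====
-- stated objective: alternative
-- what changed: Replaced the if/elif threshold cascade by a binary search (hand-rolled bisect_left) over an explicit threshold table [0,3,10] indexing a label list.
import Mathlib
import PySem

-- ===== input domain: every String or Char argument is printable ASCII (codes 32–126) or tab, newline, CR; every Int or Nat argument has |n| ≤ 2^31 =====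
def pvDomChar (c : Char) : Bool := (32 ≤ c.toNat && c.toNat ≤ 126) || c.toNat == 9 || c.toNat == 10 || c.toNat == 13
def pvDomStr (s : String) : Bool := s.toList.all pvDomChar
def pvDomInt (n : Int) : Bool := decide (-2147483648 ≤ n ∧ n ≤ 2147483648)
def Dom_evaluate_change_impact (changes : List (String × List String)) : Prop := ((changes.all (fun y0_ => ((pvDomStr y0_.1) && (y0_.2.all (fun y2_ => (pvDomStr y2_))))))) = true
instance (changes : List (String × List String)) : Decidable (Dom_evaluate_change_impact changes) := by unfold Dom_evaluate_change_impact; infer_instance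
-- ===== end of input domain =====

-- B replaces A's if/elif cascade by a hand-rolled bisect_left over a threshold table (alternative structure, same cost).

-- ===== PORT A =====
def evaluate_change_impact (changes : List (String × List String)) : String :=
  let total_changes := changes.foldl (fun acc p => acc + p.2.length) 0
  if total_changes = 0 then "stable"
  else if total_changes ≤ 3 then "minor"
  else if total_changes ≤ 10 then "moderate"
  else "significant"

-- ===== PORT B =====
-- port of Source B's _bisect_left while-loop (lo/hi binary search; Nat / matches Python // on nonnegatives)
def bisectLeftGo (a : List Nat) (x : Nat) (lo hi : Nat) : Nat :=
  if h : lo < hi then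
    let mid := (lo + hi) / 2
    if a.getD mid 0 < x then bisectLeftGo a x (mid + 1) hi
    else bisectLeftGo a x lo mid
  else lo
termination_by hi - lo
decreasing_by all_goals omega

def evaluate_change_impact_alt (changes : List (String × List String)) : String :=
  let total := (changes.map (fun p => p.2.length)).sum
  let labels := ["stable", "minor", "moderate", "significant"]
  labels.getD (bisectLeftGo [0, 3, 10] total 0 3) ""

-- ===== PRECONDITION & SPEC =====
def Spec_evaluate_change_impact (changes : List (String × List String)) (out : String) : Prop := out = evaluate_change_impact_alt changes
instance (changes : List (String × List String)) (out : String) : Decidable (Spec_evaluate_change_impact changes out) := by unfold Spec_evaluate_change_impact; infer_instance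

-- ===== CLAIM (what is proved, stated in full; the proofs are below) =====
def Claim_equal_evaluate_change_impact : Prop := ∀ (changes : List (String × List String)), Dom_evaluate_change_impact changes → Spec_evaluate_change_impact changes (evaluate_change_impact changes)

-- ===== LEMMAS AND PROOFS =====

lemma foldl_len_eq_sum (l : List (String × List String)) (acc : Nat) :
    l.foldl (fun acc p => acc + p.2.length) acc = acc + (l.map (fun p => p.2.length)).sum := by
  induction l generalizing acc with
  | nil => simp
  | cons a l ih => simp [List.foldl, ih]; omega

lemma bisect_eval (t : Nat) :
    bisectLeftGo [0, 3, 10] t 0 3 =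
      if t = 0 then 0 else if t ≤ 3 then 1 else if t ≤ 10 then 2 else 3 := by
  by_cases h10 : 10 < t
  · have h0 : ¬ t = 0 := by omega
    have h3 : ¬ t ≤ 3 := by omega
    have h10' : ¬ t ≤ 10 := by omega
    have ha : 3 < t := by omega
    simp [bisectLeftGo, h0, h3, h10, h10', ha]
  · by_cases h3 : 3 < t
    · have h0 : ¬ t = 0 := by omega
      have h3' : ¬ t ≤ 3 := by omega
      have h10' : t ≤ 10 := by omega
      simp [bisectLeftGo, h0, h3, h3', h10, h10']
    · by_cases h0 : 0 < t
      · have h0' : ¬ t = 0 := by omega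
        have h3' : t ≤ 3 := by omega
        simp [bisectLeftGo, h0, h0', h3, h3']
      · have h0' : t = 0 := by omega
        simp [bisectLeftGo, h0']

-- ===== VERDICT (by name: the statement is the Claim_ definition above) =====
theorem evaluate_change_impact_spec : Claim_equal_evaluate_change_impact := by
  intro changes _
  unfold Spec_evaluate_change_impact
  simp only [evaluate_change_impact, evaluate_change_impact_alt]
  rw [foldl_len_eq_sum, bisect_eval]
  set t := (changes.map (fun p => p.2.length)).sum with ht
  simp only [Nat.zero_add]
  by_cases h0 : t = 0
  · simp [h0]
  · by_cases h3 : t ≤ 3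
    · simp [h0, h3]
    · by_cases h10 : t ≤ 10
      · simp [h0, h3, h10]
      · simp [h0, h3, h10]
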